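-- pv_equiv track=rewrite | github.com/sacayo/Data-Science-Projects | rag-pipeline/data-engineering/main.py | parse_state_county_from_key
-- ===== SOURCE A (Python) =====
-- from typing import List, Dict, Optional, Tuple
--
-- def parse_state_county_from_key(key: str) -> Tuple[Optional[str], Optional[str]]:
--     """
--     Parse state=<state> and county=<county> from an S3 key path.
--     Returns (state, county) or (None, None) if not found.
--     """
--     state = county = None
--     parts = key.strip("/").split("/")
--     for seg in parts:
--         if seg.startswith("state="):
--             state = seg.split("=", 1)[1]
--         elif seg.startswith("county="):
--             county = seg.split("=", 1)[1]
--     return state, county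
-- ===== SOURCE B (Python) =====
-- from typing import List, Dict, Optional, Tuple
--
-- def parse_state_county_from_key(key: str) -> Tuple[Optional[str], Optional[str]]:
--     """
--     Parse state=<state> and county=<county> from an S3 key path.
--     Scans the segments BACK-TO-FRONT, once per wanted field, returning the
--     first match found (= the last match of A's forward pass) and stopping early;
--     the value is taken by slicing off the prefix instead of splitting on '='.
--     """
--     rev = key.strip("/").split("/")[::-1]
--
--     def first_from_end(prefix: str) -> Optional[str]:
--         for seg in rev:
--             if seg.startswith(prefix):
--                 return seg[len(prefix):]
--         return None
--
--     return first_from_end("state="), first_from_end("county=")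
-- ===== Notes on version B (the rewrite author's own statement) =====
-- stated objective: alternative
-- what changed: Instead of one forward pass threading two scalar accumulators through an if/elif ladder, B reverses the segment list and runs two independent early-exit searches (first match from the end equals A's last overwrite), extracting the value by slicing off the matched prefix instead of splitting the segment.
import Mathlib
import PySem

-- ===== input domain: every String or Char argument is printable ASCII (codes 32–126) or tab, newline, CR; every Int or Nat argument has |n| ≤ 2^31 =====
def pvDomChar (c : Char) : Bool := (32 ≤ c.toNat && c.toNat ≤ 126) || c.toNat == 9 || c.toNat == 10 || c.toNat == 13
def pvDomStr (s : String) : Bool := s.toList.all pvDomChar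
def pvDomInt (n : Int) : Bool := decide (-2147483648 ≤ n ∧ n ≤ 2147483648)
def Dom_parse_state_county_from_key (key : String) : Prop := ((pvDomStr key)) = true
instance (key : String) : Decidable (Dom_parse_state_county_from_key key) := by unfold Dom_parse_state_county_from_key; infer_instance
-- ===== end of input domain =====

-- B replaces A's single forward pass with two scalar accumulators by two independent
-- early-exit searches over the reversed segment list, slicing the value off the prefix (alternative; same cost).

-- ===== PORT A =====
-- seg.split("=", 1)[1]; in A this is only evaluated when seg starts with "state="/"county=", so index 1 exists (no IndexError).
def pvAfterEq (seg : List Char) : List Char :=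
  (PySem.List.pyGet? (PySem.Chars.splitOnMax seg ['='] 1) 1).getD []

def parse_state_county_from_key (key : String) : Option String × Option String :=
  let parts := PySem.Chars.splitOn (PySem.Chars.stripChars key.toList ['/']) ['/']
  let r := parts.foldl
    (fun (sc : Option (List Char) × Option (List Char)) seg =>
      if PySem.Chars.startswith seg ['s','t','a','t','e','='] then
        (some (pvAfterEq seg), sc.2)
      else if PySem.Chars.startswith seg ['c','o','u','n','t','y','='] then
        (sc.1, some (pvAfterEq seg))
      else sc)
    (none, none)
  (r.1.map String.ofList, r.2.map String.ofList)

-- ===== PORT B =====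
-- first_from_end: linear scan with early return; seg[len(prefix):] is List.drop (nonnegative start, Python clamps past the end exactly like drop).
def pvFirstFromEnd (pre : List Char) (segs : List (List Char)) : Option (List Char) :=
  match segs with
  | [] => none
  | seg :: rest =>
    if PySem.Chars.startswith seg pre then some (seg.drop pre.length)
    else pvFirstFromEnd pre rest

def parse_state_county_from_key_alt (key : String) : Option String × Option String :=
  let rev := (PySem.Chars.splitOn (PySem.Chars.stripChars key.toList ['/']) ['/']).reverse
  ((pvFirstFromEnd ['s','t','a','t','e','='] rev).map String.ofList,
   (pvFirstFromEnd ['c','o','u','n','t','y','='] rev).map String.ofList)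

-- ===== PRECONDITION & SPEC =====
def Spec_parse_state_county_from_key (key : String) (out : Option String × Option String) : Prop := out = parse_state_county_from_key_alt key
instance (key : String) (out : Option String × Option String) : Decidable (Spec_parse_state_county_from_key key out) := by unfold Spec_parse_state_county_from_key; infer_instance

-- ===== CLAIM (what is proved, stated in full; the proofs are below) =====
def Claim_equal_parse_state_county_from_key : Prop := ∀ (key : String), Dom_parse_state_county_from_key key → Spec_parse_state_county_from_key key (parse_state_county_from_key key)

-- ===== LEMMAS AND PROOFS =====

theorem pv_go_m0 (fuel : Nat) (l cur : List Char) (acc : List (List Char)) :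
    PySem.Chars.splitOnMax.go ['='] fuel 0 l cur acc = acc.reverse ++ [cur.reverse ++ l] := by
  cases fuel <;> cases l <;> simp [PySem.Chars.splitOnMax.go]

theorem pv_go_char (fuel : Nat) :
    ∀ (l cur : List Char) (acc : List (List Char)), l.length < fuel →
    PySem.Chars.splitOnMax.go ['='] fuel 1 l cur acc =
      if '=' ∈ l then
        acc.reverse ++ [cur.reverse ++ l.takeWhile (· ≠ '='), (l.dropWhile (· ≠ '=')).tail]
      else acc.reverse ++ [cur.reverse ++ l] := by
  induction fuel with
  | zero => intro l cur acc h; omega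
  | succ fuel ih =>
    intro l cur acc h
    cases l with
    | nil => simp [PySem.Chars.splitOnMax.go]
    | cons c rest =>
      by_cases hc : c = '='
      · subst hc
        rw [PySem.Chars.splitOnMax.go.eq_def]
        simp [pv_go_m0]
      · rw [PySem.Chars.splitOnMax.go.eq_def]
        have hpre : (['='] : List Char).isPrefixOf (c :: rest) = false := by
          simp [List.isPrefixOf]; exact fun h' => hc h'.symm
        simp only [hpre, if_neg (by omega : ¬ (1 : Nat) = 0), Bool.false_eq_true, if_false]
        rw [ih rest (c :: cur) acc (by simpa using Nat.lt_of_succ_lt_succ h)]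
        by_cases hm : '=' ∈ rest
        · simp [hm, hc]
        · simp [hm, hc]
          exact fun h => hc h.symm

theorem pv_split_char (l : List Char) :
    PySem.Chars.splitOnMax l ['='] 1 =
      if '=' ∈ l then [l.takeWhile (· ≠ '='), (l.dropWhile (· ≠ '=')).tail]
      else [l] := by
  unfold PySem.Chars.splitOnMax
  rw [if_neg (by omega)]
  rw [show (Int.toNat 1) = 1 from rfl, pv_go_char (l.length + 1) l [] [] (by omega)]
  simp

theorem pv_dropWhile_eq (p t : List Char) (hp : '=' ∉ p) :
    (p ++ '=' :: t).dropWhile (· ≠ '=') = '=' :: t := by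
  induction p with
  | nil => simp
  | cons a p' ih =>
    simp only [List.mem_cons, not_or] at hp
    have ha : ¬ a = '=' := fun h => hp.1 h.symm
    simp only [List.cons_append, List.dropWhile_cons]
    simp [ha]
    simpa using ih hp.2

-- when seg starts with p++"=" and p contains no '=', split("=",1)[1] is exactly seg[len(p)+1:]
theorem pv_afterEq_drop (p seg : List Char) (hp : '=' ∉ p)
    (h : PySem.Chars.startswith seg (p ++ ['=']) = true) :
    pvAfterEq seg = seg.drop (p ++ ['=']).length := by
  obtain ⟨t, rfl⟩ := (PySem.Chars.startswith_iff seg (p ++ ['='])).mp h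
  have hm : '=' ∈ (p ++ ['=']) ++ t := by simp
  unfold pvAfterEq
  rw [pv_split_char, if_pos hm]
  have hdw : ((p ++ ['=']) ++ t).dropWhile (· ≠ '=') = '=' :: t := by
    simpa using pv_dropWhile_eq p t hp
  have hdrop : ((p ++ ['=']) ++ t).drop (p ++ ['=']).length = t := by simp
  simp only [hdw, hdrop]
  rfl

-- a segment starting with "state=" does not start with "county=" and vice versa
theorem pv_not_both (seg : List Char)
    (h : PySem.Chars.startswith seg ['s','t','a','t','e','='] = true) :
    PySem.Chars.startswith seg ['c','o','u','n','t','y','='] = false := by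
  obtain ⟨t, rfl⟩ := (PySem.Chars.startswith_iff _ _).mp h
  by_contra hc
  rw [Bool.not_eq_false, PySem.Chars.startswith_iff] at hc
  obtain ⟨t', ht'⟩ := hc
  simp at ht'

-- the per-prefix forward fold "overwrite on match" computes the first match of the reversed list
theorem pv_fold_find (P p : List Char) (hP : P = p ++ ['=']) (hp : '=' ∉ p) (segs : List (List Char)) :
    ∀ (s0 : Option (List Char)),
    segs.foldl (fun s seg => if PySem.Chars.startswith seg P then some (pvAfterEq seg) else s) s0
    = match pvFirstFromEnd P segs.reverse with
      | some v => some v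
      | none => s0 := by
  subst hP
  induction segs using List.reverseRecOn with
  | nil => intro s0; simp [pvFirstFromEnd]
  | append_singleton segs' seg ih =>
    intro s0
    rw [List.foldl_append, List.reverse_append]
    simp only [List.foldl_cons, List.foldl_nil, List.reverse_singleton, List.singleton_append,
      pvFirstFromEnd]
    by_cases h : PySem.Chars.startswith seg (p ++ ['=']) = true
    · simp [h, pv_afterEq_drop p seg hp h]
    · simp only [h, if_false, Bool.false_eq_true]
      exact ih s0

-- A's paired fold splits into two independent per-prefix folds
theorem pv_fold_pair (segs : List (List Char)) :
    ∀ (sc : Option (List Char) × Option (List Char)),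
    segs.foldl
      (fun (sc : Option (List Char) × Option (List Char)) seg =>
        if PySem.Chars.startswith seg ['s','t','a','t','e','='] then
          (some (pvAfterEq seg), sc.2)
        else if PySem.Chars.startswith seg ['c','o','u','n','t','y','='] then
          (sc.1, some (pvAfterEq seg))
        else sc) sc
    = (segs.foldl (fun s seg => if PySem.Chars.startswith seg ['s','t','a','t','e','='] then some (pvAfterEq seg) else s) sc.1,
       segs.foldl (fun c seg => if PySem.Chars.startswith seg ['c','o','u','n','t','y','='] then some (pvAfterEq seg) else c) sc.2) := by
  induction segs with
  | nil => intro sc; simp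
  | cons seg rest ih =>
    intro sc
    simp only [List.foldl_cons]
    rw [ih]
    by_cases hs : PySem.Chars.startswith seg ['s','t','a','t','e','='] = true
    · simp [hs, pv_not_both seg hs]
    · by_cases hc : PySem.Chars.startswith seg ['c','o','u','n','t','y','='] = true
      · simp [hs, hc]
      · simp [hs, hc]

-- ===== VERDICT (by name: the statement is the Claim_ definition above) =====
theorem parse_state_county_from_key_spec : Claim_equal_parse_state_county_from_key := by
  intro key _
  show _ = _
  simp only [parse_state_county_from_key, parse_state_county_from_key_alt]
  rw [pv_fold_pair]
  dsimp only
  rw [pv_fold_find ['s','t','a','t','e','='] ['s','t','a','t','e'] rfl (by decide),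
      pv_fold_find ['c','o','u','n','t','y','='] ['c','o','u','n','t','y'] rfl (by decide)]
  cases pvFirstFromEnd ['s','t','a','t','e','='] ((PySem.Chars.splitOn (PySem.Chars.stripChars key.toList ['/']) ['/']).reverse) <;>
    cases pvFirstFromEnd ['c','o','u','n','t','y','='] ((PySem.Chars.splitOn (PySem.Chars.stripChars key.toList ['/']) ['/']).reverse) <;>
    simp
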